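-- pv_equiv track=rewrite | github.com/parkjisu6239/2021_APS | Programmers/기타/s5.py | solution
-- ===== SOURCE A (Python) =====
-- def solution(cookie):
--     ans = 0
--
--     for i in range(1, len(cookie)):
--         cookie[i] += cookie[i-1]
--
--     for a in range(len(cookie)-1):
--         for b in range(a, len(cookie)-1):
--             for c in range(b+1, len(cookie)):
--                 if cookie[b] - cookie[a] == cookie[c] - cookie[b]:
--                     ans = max(ans, cookie[b] - cookie[a])
--
--     return ans
-- ===== SOURCE B (Python) =====
-- def solution(cookie):
--     # O(n^2): prefix sums + a hash set of suffix prefix-sums per boundary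
--     # (does not mutate the input, unlike the original).
--     n = len(cookie)
--     P = []
--     s = 0
--     for x in cookie:
--         s += x
--         P.append(s)
--     ans = 0
--     for b in range(n - 1):
--         right = set(P[b + 1:])
--         for a in range(b + 1):
--             if 2 * P[b] - P[a] in right:
--                 ans = max(ans, P[b] - P[a])
--     return ans
-- ===== Notes on version B (the rewrite author's own statement) =====
-- stated objective: faster
-- what changed: Replaces the triple nested scan over (a,b,c) with prefix sums plus, per boundary b, a hash set of suffix prefix-sums, so the existence of a matching right segment is an O(1) lookup instead of an inner scan.
import Mathlib
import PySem

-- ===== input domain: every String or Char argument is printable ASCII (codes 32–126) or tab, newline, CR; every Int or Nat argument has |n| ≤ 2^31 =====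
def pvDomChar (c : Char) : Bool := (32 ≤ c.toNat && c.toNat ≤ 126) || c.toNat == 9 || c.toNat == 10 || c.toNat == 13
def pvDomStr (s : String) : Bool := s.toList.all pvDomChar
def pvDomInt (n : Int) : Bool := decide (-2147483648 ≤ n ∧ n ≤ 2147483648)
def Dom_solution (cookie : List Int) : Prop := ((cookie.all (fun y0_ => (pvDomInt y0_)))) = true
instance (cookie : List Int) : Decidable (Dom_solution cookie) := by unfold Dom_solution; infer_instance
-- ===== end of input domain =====

-- B replaces A's triple nested scan by prefix sums plus a per-boundary set of suffix
-- prefix-sums. Equivalence is about the RETURN value only: A mutates its argument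
-- into prefix sums in place, B does not.

-- ===== PORT A =====
def solution (cookie : List Int) : Int :=
  let ck := (PySem.List.pyRange 1 (cookie.length : Int) 1).foldl
    (fun ck i => PySem.List.pySetD ck i (PySem.List.pyGetD ck i 0 + PySem.List.pyGetD ck (i - 1) 0)) cookie
  (PySem.List.pyRange 0 ((ck.length : Int) - 1) 1).foldl (fun ans a =>
    (PySem.List.pyRange a ((ck.length : Int) - 1) 1).foldl (fun ans b =>
      (PySem.List.pyRange (b + 1) (ck.length : Int) 1).foldl (fun ans c =>
        if PySem.List.pyGetD ck b 0 - PySem.List.pyGetD ck a 0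
             == PySem.List.pyGetD ck c 0 - PySem.List.pyGetD ck b 0
        then max ans (PySem.List.pyGetD ck b 0 - PySem.List.pyGetD ck a 0)
        else ans) ans) ans) 0

-- ===== PORT B =====
def solution_alt (cookie : List Int) : Int :=
  let n : Int := cookie.length
  let sp := cookie.foldl (fun (sp : Int × List Int) x => (sp.1 + x, sp.2 ++ [sp.1 + x])) (0, [])
  let P := sp.2
  (PySem.List.pyRange 0 (n - 1) 1).foldl (fun ans b =>
    let right : PySem.Set Int := PySem.Set.ofList (PySem.List.slice P (some (b + 1)) none)
    (PySem.List.pyRange 0 (b + 1) 1).foldl (fun ans a =>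
      if PySem.Set.contains right (2 * PySem.List.pyGetD P b 0 - PySem.List.pyGetD P a 0)
      then max ans (PySem.List.pyGetD P b 0 - PySem.List.pyGetD P a 0)
      else ans) ans) 0

-- ===== PRECONDITION & SPEC =====
def Spec_solution (cookie : List Int) (out : Int) : Prop := out = solution_alt cookie
instance (cookie : List Int) (out : Int) : Decidable (Spec_solution cookie out) := by unfold Spec_solution; infer_instance

-- ===== CLAIM (what is proved, stated in full; the proofs are below) =====
def Claim_equal_solution : Prop := ∀ (cookie : List Int), Dom_solution cookie → Spec_solution cookie (solution cookie)

-- ===== LEMMAS AND PROOFS =====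

/-- Prefix sums of a list, starting from running total `s`. -/
def pref (s : Int) : List Int → List Int
  | [] => []
  | x :: xs => (s + x) :: pref (s + x) xs

theorem pref_length (s : Int) (l : List Int) : (pref s l).length = l.length := by
  induction l generalizing s with
  | nil => rfl
  | cons x xs ih => simp [pref, ih]

/-- A's in-place mutation step `cookie[i] += cookie[i-1]`. -/
def mutStep (ck : List Int) (i : Int) : List Int :=
  PySem.List.pySetD ck i (PySem.List.pyGetD ck i 0 + PySem.List.pyGetD ck (i - 1) 0)

/-- Invariant of A's first loop: the processed prefix already holds prefix sums. -/
theorem mutA (rest d : List Int) (s : Int) :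
    (PySem.List.pyRange ((d.length : Int) + 1) ((d.length : Int) + 1 + rest.length) 1).foldl
      mutStep ((d ++ [s]) ++ rest) = (d ++ [s]) ++ pref s rest := by
  induction rest generalizing d s with
  | nil => simp [PySem.List.pyRange_one_eq_nil, pref]
  | cons x r ih =>
    rw [PySem.List.pyRange_one_cons (by simp), List.foldl_cons]
    have hc1 : ((d.length : Int) + 1) = ((d.length + 1 : Nat) : Int) := by push_cast; ring
    have h1 : mutStep ((d ++ [s]) ++ x :: r) ((d.length : Int) + 1)
        = ((d ++ [s]) ++ [s + x]) ++ r := by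
      have hm1 : ((d.length : Int) + 1) - 1 = ((d.length : Nat) : Int) := by ring
      rw [mutStep, hm1, hc1, PySem.List.pySetD_natCast, PySem.List.pyGetD_natCast,
        PySem.List.pyGetD_natCast]
      rw [List.getD_append_right (d ++ [s]) _ _ _ (by simp),
        List.getD_append (d ++ [s]) (x :: r) 0 d.length (by simp),
        List.getD_append_right d [s] 0 d.length (by simp),
        List.set_append]
      simp; ring
    rw [h1]
    have h3 : (d.length : Int) + 1 + 1 = ((d ++ [s]).length : Int) + 1 := by simp
    have h2 : (d.length : Int) + 1 + ((x :: r).length : Int)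
        = (((d ++ [s]).length : Int) + 1 + (r.length : Int)) := by simp; ring
    rw [h3, h2, ih (d ++ [s]) (s + x)]
    simp [pref]

/-- A's first loop turns the cookie list into its prefix sums. -/
theorem ckA (cookie : List Int) :
    (PySem.List.pyRange 1 (cookie.length : Int) 1).foldl
      (fun ck i => PySem.List.pySetD ck i (PySem.List.pyGetD ck i 0 + PySem.List.pyGetD ck (i - 1) 0)) cookie
    = pref 0 cookie := by
  cases cookie with
  | nil => simp [PySem.List.pyRange_one_eq_nil, pref]
  | cons x xs =>
    have := mutA xs [] x
    simp only [List.length_nil, Nat.cast_zero, zero_add, List.nil_append, List.length_cons] at this ⊢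
    show (PySem.List.pyRange 1 ((xs.length + 1 : Nat) : Int) 1).foldl mutStep ([x] ++ xs) = _
    have hcast : ((xs.length + 1 : Nat) : Int) = 1 + (xs.length : Int) := by push_cast; ring
    rw [hcast, this]
    simp [pref]

/-- B's first loop builds the same prefix sums. -/
theorem prefB (l : List Int) (s : Int) (acc : List Int) :
    l.foldl (fun (sp : Int × List Int) x => (sp.1 + x, sp.2 ++ [sp.1 + x])) (s, acc)
    = (s + l.sum, acc ++ pref s l) := by
  induction l generalizing s acc with
  | nil => simp [pref]
  | cons x xs ih => simp [pref, ih, add_assoc]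

/-- A fold of `max` with a constant candidate collapses to an `any` test. -/
theorem innerMax (l : List Int) (g : Int → Bool) (v acc : Int) :
    l.foldl (fun acc c => if g c then max acc v else acc) acc
    = if l.any g then max acc v else acc := by
  induction l generalizing acc with
  | nil => simp
  | cons c cs ih => by_cases h : g c <;> simp [h, ih]

/-- The pair condition: some index `c` in `(b, n)` closes an equal right segment. -/
def condA (P : List Int) (a b : Int) : Bool :=
  (PySem.List.pyRange (b + 1) (P.length : Int) 1).any
    (fun c => PySem.List.pyGetD P b 0 - PySem.List.pyGetD P a 0
      == PySem.List.pyGetD P c 0 - PySem.List.pyGetD P b 0)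

def pairStep (P : List Int) (ans : Int) (p : Int × Int) : Int :=
  if condA P p.1 p.2 then max ans (PySem.List.pyGetD P p.2 0 - PySem.List.pyGetD P p.1 0) else ans

/-- A's pair traversal order: a-major. -/
def LA (P : List Int) : List (Int × Int) :=
  (PySem.List.pyRange 0 ((P.length : Int) - 1) 1).flatMap
    (fun a => (PySem.List.pyRange a ((P.length : Int) - 1) 1).map (fun b => (a, b)))

/-- B's pair traversal order: b-major. -/
def LB (P : List Int) : List (Int × Int) :=
  (PySem.List.pyRange 0 ((P.length : Int) - 1) 1).flatMap
    (fun b => (PySem.List.pyRange 0 (b + 1) 1).map (fun a => (a, b)))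

theorem A_eq (cookie : List Int) :
    solution cookie = (LA (pref 0 cookie)).foldl (pairStep (pref 0 cookie)) 0 := by
  simp only [solution, ckA]
  simp only [LA, List.foldl_flatMap, List.foldl_map, pairStep, condA, innerMax]

/-- B's set test agrees with A's inner scan over `c`. -/
theorem condB_eq (P : List Int) (a b : Int) (hb : 0 ≤ b) :
    PySem.Set.contains (PySem.Set.ofList (PySem.List.slice P (some (b + 1)) none))
      (2 * PySem.List.pyGetD P b 0 - PySem.List.pyGetD P a 0) = condA P a b := by
  rw [PySem.List.slice_from P (show (0:Int) ≤ b + 1 by omega)]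
  rw [Bool.eq_iff_iff]
  simp only [PySem.Set.contains, List.contains_iff_mem, PySem.Set.mem_ofList,
    condA, List.any_eq_true, PySem.List.mem_pyRange_one, beq_iff_eq]
  constructor
  · intro hmem
    obtain ⟨j, hj, hx⟩ := List.mem_iff_getElem.mp hmem
    rw [List.getElem_drop] at hx
    have hlen : (b + 1).toNat + j < P.length := by
      have := hj; simp [List.length_drop] at this; omega
    refine ⟨(((b + 1).toNat + j : Nat) : Int), ⟨by omega, by omega⟩, ?_⟩
    rw [PySem.List.pyGetD_natCast, List.getD_eq_getElem P 0 hlen]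
    omega
  · rintro ⟨c, ⟨hc1, hc2⟩, hv⟩
    have hc0 : (0 : Int) ≤ c := by omega
    have hcn : c.toNat < P.length := by omega
    rw [← Int.toNat_of_nonneg hc0, PySem.List.pyGetD_natCast, List.getD_eq_getElem P 0 hcn] at hv
    apply List.mem_iff_getElem.mpr
    refine ⟨c.toNat - (b + 1).toNat, by simp [List.length_drop]; omega, ?_⟩
    rw [List.getElem_drop]
    have h4 : (b + 1).toNat + (c.toNat - (b + 1).toNat) = c.toNat := by omega
    simp only [h4]
    omega

theorem B_eq (cookie : List Int) :
    solution_alt cookie = (LB (pref 0 cookie)).foldl (pairStep (pref 0 cookie)) 0 := by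
  simp only [solution_alt, prefB, List.nil_append, zero_add]
  simp only [LB, List.foldl_flatMap, List.foldl_map, pairStep]
  have hlen : ((pref 0 cookie).length : Int) = (cookie.length : Int) := by rw [pref_length]
  rw [← hlen]
  apply PySem.List.foldl_congr_mem'
  intro b hbmem ans
  rw [PySem.List.mem_pyRange_one] at hbmem
  apply PySem.List.foldl_congr_mem'
  intro a _ acc
  rw [condB_eq (pref 0 cookie) a b hbmem.1]

theorem foldl_pairStep_perm (P : List Int) {l₁ l₂ : List (Int × Int)} (h : l₁.Perm l₂) (init : Int) :
    l₁.foldl (pairStep P) init = l₂.foldl (pairStep P) init := by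
  haveI : RightCommutative (pairStep P) := ⟨by
    intro z x y
    simp only [pairStep]
    split_ifs <;> omega⟩
  exact h.foldl_eq init

/-- Both traversal orders enumerate the same (nodup) set of pairs. -/
theorem perm_LA_LB (P : List Int) : (LA P).Perm (LB P) := by
  apply (List.perm_ext_iff_of_nodup ?_ ?_).mpr
  · intro ⟨x, y⟩
    simp only [LA, LB, List.mem_flatMap, List.mem_map, PySem.List.mem_pyRange_one, Prod.mk.injEq]
    constructor
    · rintro ⟨a, ha, b, hb, rfl, rfl⟩; exact ⟨b, by omega, a, by omega, rfl, rfl⟩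
    · rintro ⟨b, hb, a, ha, rfl, rfl⟩; exact ⟨a, by omega, b, by omega, rfl, rfl⟩
  · refine List.nodup_flatMap.mpr
      ⟨fun a _ => (PySem.List.nodup_pyRange_one _ _).map (fun _ _ h => by simpa using h), ?_⟩
    refine (PySem.List.nodup_pyRange_one _ _).imp ?_
    intro a a' hne
    simp only [Function.onFun, List.Disjoint, List.mem_map]
    rintro ⟨x, y⟩ ⟨b, _, hb⟩ ⟨b', _, hb'⟩
    apply hne
    rw [Prod.mk.injEq] at hb hb'; omega
  · refine List.nodup_flatMap.mpr
      ⟨fun b _ => (PySem.List.nodup_pyRange_one _ _).map (fun _ _ h => by simpa using h), ?_⟩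
    refine (PySem.List.nodup_pyRange_one _ _).imp ?_
    intro b b' hne
    simp only [Function.onFun, List.Disjoint, List.mem_map]
    rintro ⟨x, y⟩ ⟨a, _, ha⟩ ⟨a', _, ha'⟩
    apply hne
    rw [Prod.mk.injEq] at ha ha'; omega

-- ===== VERDICT (by name: the statement is the Claim_ definition above) =====
theorem solution_spec : Claim_equal_solution := by
  intro cookie _
  show _ = _
  rw [A_eq, B_eq, foldl_pairStep_perm (pref 0 cookie) (perm_LA_LB (pref 0 cookie))]
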